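-- pv_equiv track=rewrite | github.com/oyarsa/faptp | scripts/converte_relatorio.py | group_eventos
-- ===== SOURCE A (Python) =====
-- from itertools import groupby
--
-- def group_eventos(events):
--     eventos = []
--     periodos = []
--     keyfunc = lambda x: x['periodo']
--     data = sorted(events, key=keyfunc)
--     for k, g in groupby(data, keyfunc):
--         eventos.append(list(g))
--         periodos.append(k)
--
--     return periodos, eventos
-- ===== SOURCE B (Python) =====
-- def group_eventos(events):
--     groups = {}
--     for e in events:
--         p = e['periodo']
--         groups[p] = groups.get(p, []) + [e]
--     periodos = sorted(groups.keys())
--     return periodos, [groups[p] for p in periodos]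
-- ===== Notes on version B (the rewrite author's own statement) =====
-- stated objective: alternative
-- what changed: Replaces sort-all-events-then-itertools.groupby with a single pass building a dict from periodo to its group, then sorting only the distinct keys.
import Mathlib
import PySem

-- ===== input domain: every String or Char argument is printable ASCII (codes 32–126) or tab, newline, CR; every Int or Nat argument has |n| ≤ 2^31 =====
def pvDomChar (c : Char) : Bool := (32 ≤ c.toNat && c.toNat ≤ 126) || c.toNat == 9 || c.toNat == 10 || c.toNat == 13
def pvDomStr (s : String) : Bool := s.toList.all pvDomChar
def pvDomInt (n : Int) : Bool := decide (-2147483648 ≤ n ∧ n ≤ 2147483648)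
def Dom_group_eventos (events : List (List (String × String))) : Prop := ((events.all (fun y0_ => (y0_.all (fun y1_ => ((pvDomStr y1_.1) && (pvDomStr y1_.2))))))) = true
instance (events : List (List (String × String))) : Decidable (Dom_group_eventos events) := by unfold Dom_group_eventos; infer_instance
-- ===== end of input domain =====

-- B replaces A's sort-then-groupby with a single-pass dict of groups plus a sort of its keys (alternative decomposition, same result).


-- ===== PORT A =====
-- keyfunc = lambda x: x['periodo']  (first match in the association list; Pre_ guarantees the key exists, so the "" default is never read on admitted inputs)
def pvKey (e : List (String × String)) : String :=
  (((e.find? (fun kv => kv.1 == "periodo")).map (fun kv => kv.2)).getD "")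

-- itertools.groupby over the sorted data: consecutive runs of equal keys
def pvRuns (es : List (List (String × String))) : List (String × List (List (String × String))) :=
  match es with
  | [] => []
  | e :: rest =>
    (pvKey e, e :: rest.takeWhile (fun y => pvKey y == pvKey e)) ::
      pvRuns (rest.dropWhile (fun y => pvKey y == pvKey e))
termination_by es.length
decreasing_by
  simp only [List.length_cons]
  exact Nat.lt_succ_of_le (List.length_dropWhile_le _ _)

def group_eventos (events : List (List (String × String))) : List String × (List (List (List (String × String)))) :=
  let data := PySem.List.sorted events pvKey false
  let runs := pvRuns data
  (runs.map (fun r => r.1), runs.map (fun r => r.2))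

-- ===== PORT B =====
def group_eventos_alt (events : List (List (String × String))) : List String × (List (List (List (String × String)))) :=
  let d := events.foldl (fun d e => d.modify (pvKey e) [] (fun g => g ++ [e])) (PySem.Dict.mk [])
  let periodos := PySem.List.sorted d.keys (fun p => p) false
  (periodos, periodos.map (fun p => d.getD p []))

-- ===== PRECONDITION & SPEC =====
-- Pre_ excludes events missing the 'periodo' key, on which Python A raises KeyError.
def Pre_group_eventos (events : List (List (String × String))) : Prop :=
  (events.all (fun e => e.any (fun kv => kv.1 == "periodo"))) = true
instance (events : List (List (String × String))) : Decidable (Pre_group_eventos events) := by unfold Pre_group_eventos; infer_instance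

def pvWitness_group_eventos : (List (List (String × String))) := [[("periodo", "1"), ("nome", "a")], [("periodo", "2")]]

def Spec_group_eventos (events : List (List (String × String))) (out : List String × (List (List (List (String × String))))) : Prop := out = group_eventos_alt events
instance (events : List (List (String × String))) (out : List String × (List (List (List (String × String))))) : Decidable (Spec_group_eventos events out) := by unfold Spec_group_eventos; infer_instance

-- ===== CLAIM (what is proved, stated in full; the proofs are below) =====
def Claim_equal_group_eventos : Prop := ∀ (events : List (List (String × String))), Dom_group_eventos events → Pre_group_eventos events → Spec_group_eventos events (group_eventos events)

-- ===== LEMMAS AND PROOFS =====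

-- B's dict lookup: the group stored at p is the events with key p, in encounter order
lemma getD_fold (events : List (List (String × String))) (p : String) :
    ((events.foldl (fun d e => d.modify (pvKey e) [] (fun g => g ++ [e])) (PySem.Dict.mk [])).getD p [])
      = events.filter (fun e => pvKey e == p) := by
  have h : events.foldl (fun d e => d.modify (pvKey e) [] (fun g => g ++ [e])) (PySem.Dict.mk [])
      = (events.map (fun e => (pvKey e, e))).foldl (fun d q => d.modify q.1 [] (fun g => g ++ [q.2])) (PySem.Dict.mk []) := by
    rw [List.foldl_map]
  rw [h, PySem.Dict.getD_foldl_modify_append]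
  simp [List.filter_map, Function.comp_def, PySem.Dict.getD, PySem.Dict.get?]

-- B's dict keys: first occurrences of the keys, in encounter order
lemma keys_fold (events : List (List (String × String))) :
    ((events.foldl (fun d e => d.modify (pvKey e) [] (fun g => g ++ [e])) (PySem.Dict.mk [])).keys)
      = PySem.Set.ofList (events.map pvKey) := by
  rw [PySem.Dict.keys_foldl_modify_key (key := pvKey)]
  rfl

lemma filter_insertBy (x : List (String × String)) (acc : List (List (String × String))) (p : String)
    (hs : (acc.map pvKey).Pairwise (· ≤ ·)) :
    (PySem.List.insertBy (fun a b => decide (pvKey a < pvKey b)) x acc).filter (fun e => pvKey e == p)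
      = acc.filter (fun e => pvKey e == p) ++ (if pvKey x == p then [x] else []) := by
  induction acc with
  | nil => simp [PySem.List.insertBy]; split <;> simp_all
  | cons y ys ih =>
    simp only [List.map_cons, List.pairwise_cons] at hs
    rw [PySem.List.insertBy]
    split
    · rename_i hlt
      simp only [decide_eq_true_eq] at hlt
      -- x goes first; if pvKey x == p then nothing in y::ys has key p
      by_cases hx : pvKey x == p
      · have hxp : pvKey x = p := by simpa using hx
        have hnone : ∀ z ∈ y :: ys, ¬ (pvKey z == p) = true := by
          intro z hz
          have hyz : pvKey y ≤ pvKey z := by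
            rcases hz with _ | hz
            · exact le_refl _
            · exact hs.1 _ (List.mem_map_of_mem ‹z ∈ ys›)
          simp only [beq_iff_eq]
          intro hzp
          rw [hzp, ← hxp] at hyz
          exact absurd (lt_of_lt_of_le hlt hyz) (lt_irrefl _)
        rw [List.filter_cons_of_pos (by simpa using hx)]
        rw [List.filter_eq_nil_iff.mpr hnone]  -- hmm shape
        simp [hx]
      · simp [List.filter_cons, hx]
    · have htail := ih hs.2
      simp only [List.filter_cons, htail]
      by_cases hy : (pvKey y == p) = true <;> simp [hy]


lemma pairwise_insertBy (x : List (String × String)) (acc : List (List (String × String)))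
    (hs : (acc.map pvKey).Pairwise (· ≤ ·)) :
    ((PySem.List.insertBy (fun a b => decide (pvKey a < pvKey b)) x acc).map pvKey).Pairwise (· ≤ ·) := by
  induction acc with
  | nil => simp [PySem.List.insertBy]
  | cons y ys ih =>
    simp only [List.map_cons, List.pairwise_cons] at hs
    rw [PySem.List.insertBy]
    split
    · rename_i hlt
      simp only [decide_eq_true_eq] at hlt
      refine List.pairwise_cons.mpr ⟨?_, List.pairwise_cons.mpr hs⟩
      intro b hb
      simp only [List.map_cons, List.mem_cons] at hb
      rcases hb with rfl | hb
      · exact le_of_lt hlt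
      · exact le_trans (le_of_lt hlt) (hs.1 _ hb)
    · rename_i hnlt
      simp only [decide_eq_true_eq] at hnlt
      rw [not_lt] at hnlt
      refine List.pairwise_cons.mpr ⟨?_, ih hs.2⟩
      intro b hb
      simp only [List.mem_map] at hb
      obtain ⟨z, hz, rfl⟩ := hb
      rcases (PySem.List.mem_insertBy _ _ _ _).mp hz with rfl | hz'
      · exact hnlt
      · exact hs.1 _ (List.mem_map_of_mem hz')

lemma foldl_ins_filter (p : String) (xs : List (List (String × String))) :
    ∀ acc, (acc.map pvKey).Pairwise (· ≤ ·) →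
    (xs.foldl (fun a x => PySem.List.insertBy (fun a b => decide (pvKey a < pvKey b)) x a) acc).filter (fun e => pvKey e == p)
      = acc.filter (fun e => pvKey e == p) ++ xs.filter (fun e => pvKey e == p) := by
  induction xs with
  | nil => intro acc _; simp
  | cons x xs ih =>
    intro acc hacc
    rw [List.foldl_cons, ih _ (pairwise_insertBy x acc hacc), filter_insertBy x acc p hacc,
      List.filter_cons]
    by_cases hx : (pvKey x == p) = true <;> simp [hx]


lemma filter_sorted (events : List (List (String × String))) (p : String) :
    (PySem.List.sorted events pvKey false).filter (fun e => pvKey e == p)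
      = events.filter (fun e => pvKey e == p) := by
  rw [PySem.List.sorted_eq_foldl_insertBy]
  simpa using foldl_ins_filter p events [] (by simp)

lemma runs_spec (s : List (List (String × String))) (hs : (s.map pvKey).Pairwise (· ≤ ·)) :
    (∀ r ∈ pvRuns s, r.1 ∈ s.map pvKey ∧ r.2 = s.filter (fun e => pvKey e == r.1))
    ∧ ((pvRuns s).map (fun r => r.1)).Pairwise (· < ·)
    ∧ (∀ p, p ∈ (pvRuns s).map (fun r => r.1) ↔ p ∈ s.map pvKey) := by
  induction s using pvRuns.induct with
  | case1 => simp [pvRuns]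
  | case2 e rest ih =>
    set p0 := pvKey e with hp0
    set t := rest.takeWhile (fun y => pvKey y == p0) with ht
    set dr := rest.dropWhile (fun y => pvKey y == p0) with hdr
    have hsplit : rest = t ++ dr := (List.takeWhile_append_dropWhile).symm
    simp only [List.map_cons, List.pairwise_cons] at hs
    have hle : ∀ z ∈ rest, p0 ≤ pvKey z := fun z hz => hs.1 _ (List.mem_map_of_mem hz)
    have hdrsub : dr.Sublist rest := List.dropWhile_sublist _
    have hdrp : ((dr.map pvKey)).Pairwise (· ≤ ·) := hs.2.sublist (hdrsub.map _)
    have hlt : ∀ z ∈ dr, p0 < pvKey z := by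
      intro z0 hz
      cases hdr' : dr with
      | nil => rw [hdr'] at hz; cases hz
      | cons h tl =>
        rw [hdr'] at hz
        have hne : List.dropWhile (fun y => pvKey y == p0) rest ≠ [] := by
          rw [← hdr, hdr']; simp
        have h0 : (fun y => pvKey y == p0) ((List.dropWhile (fun y => pvKey y == p0) rest).head hne) = false :=
          List.head_dropWhile_not _ hne
        have hhd : (List.dropWhile (fun y => pvKey y == p0) rest).head hne = h := by
          simp [← hdr, hdr']
        have hhne : ¬ (pvKey h == p0) = true := by
          rw [hhd] at h0; simp only [h0]; simp
        have hh : p0 < pvKey h := by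
          have hle' := hle h (by rw [hsplit, hdr']; simp)
          rcases lt_or_eq_of_le hle' with h' | h'
          · exact h'
          · exact absurd (by simp [← h']) hhne
        rcases List.mem_cons.mp hz with rfl | hz
        · exact hh
        · have : pvKey h ≤ pvKey z0 := by
            rw [hdr'] at hdrp
            simp only [List.map_cons, List.pairwise_cons] at hdrp
            exact hdrp.1 _ (List.mem_map_of_mem hz)
          exact lt_of_lt_of_le hh this
    have htk : ∀ y ∈ t, pvKey y = p0 := by
      intro y hy
      have := List.mem_takeWhile_imp (ht ▸ hy)
      simpa using this
    have ihs := ih hdrp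
    have hheadgrp : (e :: rest).filter (fun e' => pvKey e' == p0) = e :: t := by
      rw [List.filter_cons_of_pos (by simp [hp0]), hsplit, List.filter_append]
      rw [List.filter_eq_self.mpr (by intro y hy; simp [htk y hy])]
      rw [List.filter_eq_nil_iff.mpr (by intro z hz; simp; exact fun h => absurd h.symm (ne_of_lt (hlt z hz)))]
      simp
    have hgrp2 : ∀ q, p0 < q → (e :: rest).filter (fun e' => pvKey e' == q) = dr.filter (fun e' => pvKey e' == q) := by
      intro q hq
      rw [List.filter_cons_of_neg (by simp; exact fun h => absurd h (ne_of_lt hq)), hsplit, List.filter_append]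
      rw [List.filter_eq_nil_iff.mpr (by intro y hy; simp [htk y hy]; exact fun h => absurd h (ne_of_lt hq))]
      simp
    have hkeys : ∀ q ∈ (pvRuns dr).map (fun r => r.1), p0 < q := by
      intro q hq
      have := (ihs.2.2 q).mp hq
      simp only [List.mem_map] at this
      obtain ⟨z, hz, rfl⟩ := this
      exact hlt z hz
    rw [pvRuns]
    refine ⟨?_, ?_, ?_⟩
    · intro r hr
      rcases List.mem_cons.mp hr with rfl | hr
      · exact ⟨by simp, hheadgrp.symm⟩
      · obtain ⟨h1, h2⟩ := (ihs.1) r hr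
        have hrq : p0 < r.1 := by
          obtain ⟨z, hz, hzz⟩ := List.mem_map.mp h1
          rw [← hzz]; exact hlt z hz
        refine ⟨?_, ?_⟩
        · simp only [List.map_cons, List.mem_cons]
          right
          rw [hsplit, List.map_append]
          exact List.mem_append_right _ h1
        · rw [hgrp2 r.1 hrq]; exact h2
    · simp only [List.map_cons, List.pairwise_cons]
      exact ⟨hkeys, ihs.2.1⟩
    · intro p
      simp only [List.map_cons, List.mem_cons]
      constructor
      · rintro (rfl | hp)
        · left; rfl
        · right
          have := (ihs.2.2 p).mp hp
          rw [hsplit, List.map_append]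
          exact List.mem_append_right _ this
      · rintro (rfl | hp)
        · left; rfl
        · rw [hsplit, List.map_append, List.mem_append] at hp
          rcases hp with hp | hp
          · left
            obtain ⟨y, hy, rfl⟩ := List.mem_map.mp hp
            exact htk y hy
          · right; exact (ihs.2.2 p).mpr hp

-- ===== VERDICT (by name: the statement is the Claim_ definition above) =====
theorem group_eventos_spec : Claim_equal_group_eventos := by
  intro events _ _
  unfold Spec_group_eventos group_eventos group_eventos_alt
  dsimp only
  set s := PySem.List.sorted events pvKey false with hsdef
  have hs : (s.map pvKey).Pairwise (· ≤ ·) := PySem.List.sorted_map_key_pairwise _ _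
  obtain ⟨hgrp, hpw, hmem⟩ := runs_spec s hs
  rw [keys_fold]
  have hperm : s.Perm events := PySem.List.sorted_perm _ _ _
  have hK : ((pvRuns s).map (fun r => r.1)).Perm (PySem.Set.ofList (events.map pvKey)) := by
    refine (List.perm_ext_iff_of_nodup (hpw.imp ne_of_lt) (PySem.Set.nodup_ofList _)).mpr ?_
    intro p
    rw [hmem p, PySem.Set.mem_ofList]
    exact (hperm.map pvKey).mem_iff
  have hsorted : PySem.List.sorted (PySem.Set.ofList (events.map pvKey)) (fun p => p) false
      = (pvRuns s).map (fun r => r.1) :=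
    PySem.List.sorted_eq_of_perm_of_pairwise_lt _ _ _ hK hpw
  rw [hsorted]
  refine Prod.ext rfl ?_
  simp only [List.map_map]
  refine List.map_congr_left ?_
  intro r hr
  simp only [Function.comp]
  rw [getD_fold, ← filter_sorted, ← hsdef, (hgrp r hr).2]
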